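-- pv_equiv track=rewrite | github.com/Florent-LC/Viola-Jones | construction_classifieurs_forts.py | combinliste
-- ===== SOURCE A (Python) =====
-- def combinliste(l,k):
--     '''l : liste
--     k : int
--     Renvoie toutes les possibilités de choisir k éléments de l différents
--     Par définition, la longueur du résultat est k parmi len(l)'''
--     p = []
--     i, imax = 0, 2**len(l)-1
--     while i<=imax:
--         s = []
--         j, jmax = 0, len(l)-1
--         while j<=jmax:
--             if (i>>j)&1==1:
--                 s.append(l[j])
--             j += 1
--         if len(s)==k:
--             p.append(s)
--         i += 1
--     return p
-- ===== SOURCE B (Python) =====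
-- def combinliste(l, k):
--     '''Same result as A: all k-element subsets of l, listed in increasing
--     bitmask-value (colexicographic index) order.'''
--     if k < 0:
--         return []
--     def colex(n, kk):
--         # k-subsets of l[:n] in colex order of their index sets
--         if kk == 0:
--             return [[]]
--         res = []
--         for j in range(kk - 1, n):
--             for c in colex(j, kk - 1):
--                 res.append(c + [l[j]])
--         return res
--     return colex(len(l), k)
-- ===== Notes on version B (the rewrite author's own statement) =====
-- stated objective: faster
-- what changed: B generates the k-element subsets directly in increasing bitmask-value (colexicographic) order by recursing on the largest chosen index, instead of enumerating all 2^n bitmasks and keeping those with exactly k set bits; intended as faster (O(C(n,k)*k) vs O(2^n*n)) and measured hundreds of times faster at n=16, though for k near n/2 the output itself has C(n,k) entries so very large n remain infeasible for both.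
import Mathlib
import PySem

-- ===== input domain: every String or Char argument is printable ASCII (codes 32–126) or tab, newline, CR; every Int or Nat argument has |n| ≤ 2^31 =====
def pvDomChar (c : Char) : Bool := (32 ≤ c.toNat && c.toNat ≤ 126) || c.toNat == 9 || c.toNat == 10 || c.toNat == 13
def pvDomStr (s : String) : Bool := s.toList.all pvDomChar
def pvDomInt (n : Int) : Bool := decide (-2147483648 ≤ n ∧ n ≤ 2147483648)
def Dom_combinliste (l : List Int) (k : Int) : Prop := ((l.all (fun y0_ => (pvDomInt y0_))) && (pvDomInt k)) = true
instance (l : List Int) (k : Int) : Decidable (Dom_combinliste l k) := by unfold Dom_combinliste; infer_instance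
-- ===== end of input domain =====

-- B generates the k-subsets directly in increasing bitmask-value (colexicographic) order instead of scanning all 2^n masks.

-- ===== PORT A =====
-- 'while i<=imax' / 'while j<=jmax' counting loops → folds over List.range; l[j] with 0 ≤ j < len l → getD (exact here)
def combinliste (l : List Int) (k : Int) : List (List Int) :=
  (List.range (2 ^ l.length)).foldl (fun p i =>
    let s := (List.range l.length).foldl (fun s j =>
      if (i >>> j) &&& 1 == 1 then s ++ [l.getD j 0] else s) []
    if ((s.length : Int) == k) then p ++ [s] else p) []

-- ===== PORT B =====
-- colex(n, kk): 'for j in range(kk-1, n): for c in colex(j, kk-1): res.append(c + [l[j]])'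
def colexAux (l : List Int) : Nat → Nat → List (List Int)
  | _, 0 => [[]]
  | n, kk + 1 =>
      (List.range' kk (n - kk)).flatMap (fun j =>
        (colexAux l j kk).map (fun c => c ++ [l.getD j 0]))

def combinliste_alt (l : List Int) (k : Int) : List (List Int) :=
  if k < 0 then [] else colexAux l l.length k.toNat

-- ===== PRECONDITION & SPEC =====
def Spec_combinliste (l : List Int) (k : Int) (out : List (List Int)) : Prop := out = combinliste_alt l k
instance (l : List Int) (k : Int) (out : List (List Int)) : Decidable (Spec_combinliste l k out) := by unfold Spec_combinliste; infer_instance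

-- ===== CLAIM (what is proved, stated in full; the proofs are below) =====
def Claim_equal_combinliste : Prop := ∀ (l : List Int) (k : Int), Dom_combinliste l k → Spec_combinliste l k (combinliste l k)

-- ===== LEMMAS AND PROOFS =====

-- the subset of l selected by the low n bits of the mask i (what A's inner loop builds)
def pvSub (l : List Int) (n i : Nat) : List Int :=
  ((List.range n).filter (fun j => i.testBit j)).map (fun j => l.getD j 0)

theorem pv_bit_test (i j : Nat) : ((i >>> j) &&& 1 == 1) = i.testBit j := by
  rcases Nat.mod_two_eq_zero_or_one (i >>> j) with h | h <;>
    simp [Nat.testBit, Nat.and_one_is_mod, Nat.one_and_eq_mod_two, h]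

theorem pv_inner (l : List Int) (n i : Nat) :
    (List.range n).foldl (fun s j => if (i >>> j) &&& 1 == 1 then s ++ [l.getD j 0] else s) []
      = pvSub l n i := by
  simp only [pv_bit_test]
  rw [PySem.List.foldl_append_if (fun j => i.testBit j) (fun j => l.getD j 0)]
  simp [pvSub]

theorem pv_A_eq (l : List Int) (k : Int) :
    combinliste l k
      = ((List.range (2 ^ l.length)).map (pvSub l l.length)).filter
          (fun s => (s.length : Int) == k) := by
  unfold combinliste
  simp only [pv_inner]
  rw [PySem.List.foldl_append_if (fun i => ((pvSub l l.length i).length : Int) == k)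
        (pvSub l l.length), List.filter_map]
  simp [Function.comp_def]

theorem colexAux_nil (l : List Int) (n k : Nat) (h : n < k) : colexAux l n k = [] := by
  cases k with
  | zero => omega
  | succ kk => simp [colexAux, Nat.sub_eq_zero_of_le (by omega : n ≤ kk)]

theorem pv_main (l : List Int) : ∀ (n k : Nat),
    ((List.range (2 ^ n)).map (pvSub l n)).filter (fun s => s.length == k)
      = colexAux l n k := by
  intro n
  induction n with
  | zero =>
    intro k
    cases k with
    | zero => simp [colexAux, pvSub]
    | succ kk => simp [colexAux, pvSub]
  | succ n ih =>
    intro k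
    have hsplit : List.range (2 ^ (n + 1))
        = List.range (2 ^ n) ++ (List.range (2 ^ n)).map (fun x => 2 ^ n + x) := by
      rw [Nat.two_pow_succ, List.range_add]
    have h1 : ∀ i ∈ List.range (2 ^ n), pvSub l (n + 1) i = pvSub l n i := by
      intro i hi
      rw [List.mem_range] at hi
      unfold pvSub
      rw [List.range_succ, List.filter_append, List.map_append]
      simp [Nat.testBit_lt_two_pow hi]
    have h2 : ∀ i ∈ List.range (2 ^ n),
        pvSub l (n + 1) (2 ^ n + i) = pvSub l n i ++ [l.getD n 0] := by
      intro i hi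
      rw [List.mem_range] at hi
      unfold pvSub
      rw [List.range_succ, List.filter_append, List.map_append]
      congr 1
      · congr 1
        apply List.filter_congr
        intro j hj
        rw [List.mem_range] at hj
        rw [Nat.testBit_two_pow_add_gt hj]
      · simp [Nat.testBit_two_pow_add_eq, Nat.testBit_lt_two_pow hi]
    rw [hsplit, List.map_append, List.filter_append]
    rw [List.map_congr_left h1]
    rw [List.map_map, List.map_congr_left (by intro i hi; exact h2 i hi :
          ∀ i ∈ List.range (2 ^ n), (pvSub l (n+1) ∘ (fun x => 2 ^ n + x)) i
            = pvSub l n i ++ [l.getD n 0])]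
    have hmap : (List.range (2 ^ n)).map (fun i => pvSub l n i ++ [l.getD n 0])
        = ((List.range (2 ^ n)).map (pvSub l n)).map (fun s => s ++ [l.getD n 0]) := by
      rw [List.map_map]; rfl
    rw [hmap]
    cases k with
    | zero =>
      rw [ih 0]
      have h0 : (((List.range (2 ^ n)).map (pvSub l n)).map
          (fun s => s ++ [l.getD n 0])).filter (fun s => s.length == 0) = [] := by
        apply List.filter_eq_nil_iff.mpr
        intro s hs
        rw [List.mem_map] at hs
        obtain ⟨t, _, rfl⟩ := hs
        simp
      rw [h0]
      simp [colexAux]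
    | succ kk =>
      rw [ih (kk + 1), List.filter_map]
      have hcond : ((fun s : List Int => s.length == kk + 1) ∘ (fun s => s ++ [l.getD n 0]))
          = (fun s : List Int => s.length == kk) := by
        funext s; simp
      rw [hcond, ih kk]
      by_cases hk : kk ≤ n
      · have hone : n + 1 - kk = (n - kk) + 1 := by omega
        simp only [colexAux, hone, List.range'_concat]
        rw [List.flatMap_append]
        congr 1
        simp [Nat.add_sub_cancel' hk]
      · have hn : n < kk := by omega
        rw [colexAux_nil l n (kk+1) (by omega), colexAux_nil l n kk hn,
            colexAux_nil l (n+1) (kk+1) (by omega)]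
        simp

theorem pv_beq_cast (a b : Nat) : ((a : Int) == (b : Int)) = (a == b) := by
  by_cases h : a = b <;> simp [h]

-- ===== VERDICT (by name: the statement is the Claim_ definition above) =====
theorem combinliste_spec : Claim_equal_combinliste := by
  intro l k _
  unfold Spec_combinliste combinliste_alt
  rw [pv_A_eq]
  by_cases hk : k < 0
  · rw [if_pos hk]
    apply List.filter_eq_nil_iff.mpr
    intro s _
    simp only [beq_iff_eq]
    omega
  · rw [if_neg hk]
    obtain ⟨m, rfl⟩ : ∃ m : Nat, k = (m : Int) :=
      ⟨k.toNat, (Int.toNat_of_nonneg (not_lt.mp hk)).symm⟩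
    rw [Int.toNat_natCast]
    rw [← pv_main l l.length m]
    apply List.filter_congr
    intro s _
    exact pv_beq_cast s.length m
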